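-- pv_equiv track=rewrite | github.com/husnainalix77/HusnainPythonPortfolio | Connect-Four-AI-Updated/connect_four_updated.py | allValidColumns
-- ===== SOURCE A (Python) =====
-- def getColumn(grid, col_num):
--     'Return the values of a specific column as a list'
--     return list(map(lambda row: row[col_num], grid))
--
-- def allValidColumns(grid):
--     'Gets all valid columns(Prefering center one first) where move can be made'
--     total_cols = len(grid[0])
--     center = total_cols // 2
--     search_order = [center]
--     for offset in range(1, total_cols // 2 + 1):
--         if center - offset >= 0:
--             search_order.append(center - offset)
--         if center + offset < total_cols:
--             search_order.append(center + offset)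
--     cols = [col_num for col_num in search_order if '-' in getColumn(grid, col_num)]
--     return cols
-- ===== SOURCE B (Python) =====
-- def allValidColumns(grid):
--     'Gets all valid columns(Prefering center one first) where move can be made'
--     total_cols = len(grid[0])
--     center = total_cols // 2
--     order = sorted(range(total_cols), key=lambda c: (abs(c - center), c))
--     return [c for c in order if any(row[c] == '-' for row in grid)]
-- ===== Notes on version B (the rewrite author's own statement) =====
-- stated objective: simpler
-- what changed: Replaces the hand-rolled offset-expansion loop that interleaves center-offset/center+offset with a single stable sort of all column indices by the key (abs(c-center), c), and inlines getColumn into an any() generator in the filter.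
import Mathlib
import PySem

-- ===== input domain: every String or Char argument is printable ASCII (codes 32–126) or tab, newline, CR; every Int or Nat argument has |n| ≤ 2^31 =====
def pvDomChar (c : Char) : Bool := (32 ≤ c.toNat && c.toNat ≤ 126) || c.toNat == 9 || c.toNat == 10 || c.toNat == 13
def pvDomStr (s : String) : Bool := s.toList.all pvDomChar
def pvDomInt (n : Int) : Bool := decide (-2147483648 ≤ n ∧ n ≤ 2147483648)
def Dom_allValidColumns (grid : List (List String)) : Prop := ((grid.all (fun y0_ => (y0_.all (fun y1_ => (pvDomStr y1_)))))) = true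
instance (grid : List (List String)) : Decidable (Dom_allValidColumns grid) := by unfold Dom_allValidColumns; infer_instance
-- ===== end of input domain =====

-- B replaces A's offset-expansion loop by one stable sort of the column indices keyed by (|c-center|, c); same result, plainer code.

-- ===== PORT A =====
def getColumn (grid : List (List String)) (colNum : Int) : List (Option String) :=
  grid.map (fun row => PySem.List.pyGet? row colNum)

def allValidColumns (grid : List (List String)) : List Int :=
  let totalCols : Int := ((PySem.List.pyGet? grid 0).getD []).length
  let center : Int := PySem.Int.floordiv totalCols 2
  let searchOrder : List Int :=
    (PySem.List.pyRange 1 (PySem.Int.floordiv totalCols 2 + 1) 1).foldl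
      (fun so offset =>
        let so2 := if 0 ≤ center - offset then so ++ [center - offset] else so
        if center + offset < totalCols then so2 ++ [center + offset] else so2)
      [center]
  searchOrder.filter (fun colNum => (getColumn grid colNum).contains (some "-"))

-- ===== PORT B =====
def allValidColumns_alt (grid : List (List String)) : List Int :=
  let totalCols : Int := ((PySem.List.pyGet? grid 0).getD []).length
  let center : Int := PySem.Int.floordiv totalCols 2
  -- tuple key (abs(c-center), c): Python's tuple order on Int pairs is the lexicographic order, ported via toLex
  let order : List Int :=
    PySem.List.sorted (PySem.List.pyRange 0 totalCols 1) (fun c => toLex (|c - center|, c)) false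
  order.filter (fun c => grid.any (fun row => PySem.List.pyGet? row c == some "-"))

-- ===== PRECONDITION & SPEC =====
-- Pre_ excludes exactly the inputs where Python A raises IndexError: the empty grid,
-- a first row of length 0, or some row shorter than the first row (row[col] out of range).
def Pre_allValidColumns (grid : List (List String)) : Prop :=
  grid ≠ [] ∧ 0 < grid.headI.length ∧ ∀ row ∈ grid, grid.headI.length ≤ row.length
instance (grid : List (List String)) : Decidable (Pre_allValidColumns grid) := by
  unfold Pre_allValidColumns; infer_instance
def pvWitness_allValidColumns : List (List String) := [["-", "X"], ["O", "-"]]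

def Spec_allValidColumns (grid : List (List String)) (out : List Int) : Prop := out = allValidColumns_alt grid
instance (grid : List (List String)) (out : List Int) : Decidable (Spec_allValidColumns grid out) := by unfold Spec_allValidColumns; infer_instance

-- ===== CLAIM (what is proved, stated in full; the proofs are below) =====
def Claim_equal_allValidColumns : Prop := ∀ (grid : List (List String)), Dom_allValidColumns grid → Pre_allValidColumns grid → Spec_allValidColumns grid (allValidColumns grid)

-- ===== LEMMAS AND PROOFS =====

-- the block appended for one offset o
def pvBlock (c n o : Int) : List Int :=
  (if 0 ≤ c - o then [c - o] else []) ++ (if c + o < n then [c + o] else [])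

-- the order list after offsets 1..k
def pvYs (c n : Int) (k : Nat) : List Int :=
  [c] ++ (PySem.List.pyRange 1 ((k : Int) + 1) 1).flatMap (pvBlock c n)

lemma pvYs_zero (c n : Int) : pvYs c n 0 = [c] := by
  simp [pvYs]

lemma pvBlock_abs (c n o : Int) (ho : 0 ≤ o) (x : Int) (hx : x ∈ pvBlock c n o) :
    |x - c| = o := by
  simp only [pvBlock, List.mem_append, List.mem_ite_nil_right, List.mem_singleton] at hx
  rcases hx with ⟨-, rfl⟩ | ⟨-, rfl⟩
  · rw [show c - o - c = -o from by ring, abs_neg, abs_of_nonneg ho]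
  · rw [show c + o - c = o from by ring, abs_of_nonneg ho]

lemma pvYs_succ (c n : Int) (k : Nat) :
    pvYs c n (k + 1) = pvYs c n k ++ pvBlock c n ((k : Int) + 1) := by
  have h : ((k + 1 : Nat) : Int) + 1 = ((k : Int) + 1) + 1 := by push_cast; ring
  rw [pvYs, h, PySem.List.pyRange_one_succ_right (by omega)]
  simp [pvYs, List.flatMap_append]

lemma pvYs_mem_bound (c n : Int) (k : Nat) :
    ∀ x ∈ pvYs c n k, |x - c| ≤ (k : Int) := by
  induction k with
  | zero => intro x hx; rw [pvYs_zero] at hx; simp at hx; simp [hx]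
  | succ k ih =>
      intro x hx
      rw [pvYs_succ, List.mem_append] at hx
      rcases hx with hx | hx
      · have := ih x hx; push_cast; omega
      · have := pvBlock_abs c n ((k : Int) + 1) (by positivity) x hx
        push_cast; omega

lemma pvYs_pairwise (c n : Int) (k : Nat) :
    (pvYs c n k).Pairwise (fun a b => toLex (|a - c|, a) < toLex (|b - c|, b)) := by
  induction k with
  | zero => rw [pvYs_zero]; simp
  | succ k ih =>
      rw [pvYs_succ]
      apply List.pairwise_append.2
      refine ⟨ih, ?_, ?_⟩
      · simp only [pvBlock]
        apply List.pairwise_append.2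
        refine ⟨?_, ?_, ?_⟩
        · split_ifs <;> simp
        · split_ifs <;> simp
        · intro a ha b hb
          rw [List.mem_ite_nil_right, List.mem_singleton] at ha hb
          obtain ⟨-, rfl⟩ := ha
          obtain ⟨-, rfl⟩ := hb
          rw [Prod.Lex.toLex_lt_toLex]
          right
          refine ⟨?_, by omega⟩
          show |c - ((k : Int) + 1) - c| = |c + ((k : Int) + 1) - c|
          rw [show c - ((k : Int) + 1) - c = -((k : Int) + 1) from by ring, abs_neg,
              show c + ((k : Int) + 1) - c = (k : Int) + 1 from by ring]
      · intro a ha b hb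
        have hab := pvYs_mem_bound c n k a ha
        have hbk : |b - c| = (k : Int) + 1 := pvBlock_abs c n _ (by positivity) b hb
        rw [Prod.Lex.toLex_lt_toLex]
        left; omega

lemma pvYs_nodup (c n : Int) (k : Nat) : (pvYs c n k).Nodup := by
  have := pvYs_pairwise c n k
  refine this.imp ?_
  intro a b h hab
  subst hab
  exact absurd h (lt_irrefl _)

lemma pvYs_mem_iff (n : Nat) (hn : 1 ≤ n) (x : Int) :
    x ∈ pvYs ((n / 2 : Nat) : Int) (n : Int) (n / 2) ↔ 0 ≤ x ∧ x < (n : Int) := by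
  constructor
  · intro hx
    simp only [pvYs, pvBlock, List.mem_append, List.mem_flatMap, List.mem_singleton,
      PySem.List.mem_pyRange_one, List.mem_ite_nil_right] at hx
    rcases hx with rfl | ⟨o, ⟨ho1, ho2⟩, hx⟩
    · constructor <;> [positivity; (push_cast; omega)]
    · rcases hx with ⟨h1, rfl⟩ | ⟨h1, rfl⟩ <;> (push_cast at *; omega)
  · intro ⟨h0, h1⟩
    simp only [pvYs, pvBlock, List.mem_append, List.mem_flatMap, List.mem_singleton,
      PySem.List.mem_pyRange_one, List.mem_ite_nil_right]
    by_cases hc : x = ((n / 2 : Nat) : Int)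
    · left; exact hc
    · right
      by_cases hlt : x < ((n / 2 : Nat) : Int)
      · exact ⟨((n / 2 : Nat) : Int) - x, ⟨by omega, by omega⟩, Or.inl ⟨by omega, by ring⟩⟩
      · refine ⟨x - ((n / 2 : Nat) : Int), ⟨by omega, ?_⟩, Or.inr ⟨by omega, by ring⟩⟩
        have : 2 * (n / 2) + 1 ≥ n := by omega
        push_cast at *; omega

lemma pvYs_perm (n : Nat) (hn : 1 ≤ n) :
    (pvYs ((n / 2 : Nat) : Int) (n : Int) (n / 2)).Perm (PySem.List.pyRange 0 (n : Int) 1) := by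
  rw [List.perm_ext_iff_of_nodup (pvYs_nodup _ _ _) (PySem.List.nodup_pyRange_one 0 (n : Int))]
  intro x
  rw [pvYs_mem_iff n hn x, PySem.List.mem_pyRange_one]

-- the sorted order of B equals A's search order (stated over pvYs)
lemma pvSorted_eq (n : Nat) (hn : 1 ≤ n) :
    PySem.List.sorted (PySem.List.pyRange 0 (n : Int) 1)
      (fun c => toLex (|c - ((n / 2 : Nat) : Int)|, c)) false
    = pvYs ((n / 2 : Nat) : Int) (n : Int) (n / 2) :=
  PySem.List.sorted_eq_of_perm_of_pairwise_lt _ _ _ (pvYs_perm n hn) (pvYs_pairwise _ _ _)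

-- A's foldl equals pvYs
lemma pvFoldl_eq_pvYs (c n : Int) (k : Nat) :
    (PySem.List.pyRange 1 ((k : Int) + 1) 1).foldl
      (fun so offset =>
        let so2 := if 0 ≤ c - offset then so ++ [c - offset] else so
        if c + offset < n then so2 ++ [c + offset] else so2)
      [c]
    = pvYs c n k := by
  have hbody : (PySem.List.pyRange 1 ((k : Int) + 1) 1).foldl
      (fun so offset =>
        let so2 := if 0 ≤ c - offset then so ++ [c - offset] else so
        if c + offset < n then so2 ++ [c + offset] else so2)
      [c]
    = (PySem.List.pyRange 1 ((k : Int) + 1) 1).foldl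
      (fun so offset => so ++ pvBlock c n offset) [c] := by
    apply PySem.List.foldl_congr_mem
    intro acc x _
    simp only [pvBlock]
    split_ifs <;> simp
  rw [hbody, PySem.List.foldl_append_eq_flatMap]
  rfl

lemma pvFloordiv_cast (m : Nat) : PySem.Int.floordiv (m : Int) 2 = ((m / 2 : Nat) : Int) := by
  simp only [PySem.Int.floordiv]
  rw [Int.fdiv_eq_ediv]
  simp

lemma pvPred_eq (grid : List (List String)) (c : Int) :
    ((getColumn grid c).contains (some "-"))
      = grid.any (fun row => PySem.List.pyGet? row c == some "-") := by
  simp only [getColumn]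
  rw [List.contains_eq_any_beq, List.any_map]
  congr 1
  funext row
  exact Bool.beq_comm ..

-- ===== VERDICT (by name: the statement is the Claim_ definition above) =====
theorem allValidColumns_spec : Claim_equal_allValidColumns := by
  intro grid _ hpre
  obtain ⟨hne, hlen, _⟩ := hpre
  unfold Spec_allValidColumns allValidColumns allValidColumns_alt
  cases grid with
  | nil => exact absurd rfl hne
  | cons r0 rest =>
    simp only [List.headI] at hlen
    have hget : PySem.List.pyGet? (r0 :: rest) 0 = some r0 := by
      simp [PySem.List.pyGet?, PySem.List.pyIdx?]
    rw [hget]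
    simp only [Option.getD_some]
    set n : Nat := r0.length with hn
    rw [pvFloordiv_cast n]
    rw [pvFoldl_eq_pvYs ((n / 2 : Nat) : Int) (n : Int) (n / 2)]
    rw [pvSorted_eq n (by omega)]
    apply List.filter_congr
    intro c _
    rw [pvPred_eq]
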